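-- pv_equiv track=rewrite | github.com/h44256/OpenCV_readGround_sideProject | OpenCV_Mouse_Ground_Plus.py | reselect_x_coordinates
-- ===== SOURCE A (Python) =====
-- def reselect_x_coordinates(coordinates_lst):
--     coordinates_lst = sorted(coordinates_lst)
--     bag = []
--     result = []
--     result.append(coordinates_lst[0])
--     for i in coordinates_lst:
--         if len(bag) == 0:
--             bag.append(i)
--         else:
--             if i-bag[-1] <=3:
--                 bag.append(i)
--             else:
--                 if len(bag) >=2:
--                     result.append(bag[-1])
--                 bag.clear()
--                 bag.append(i)
--     result.append(i)
--     return result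
-- ===== SOURCE B (Python) =====
-- def reselect_x_coordinates(coordinates_lst):
--     s = sorted(coordinates_lst)
--     # stateless local rule: b is a representative iff the gap after b is > 3
--     # and the gap before b is <= 3 (b closes a cluster that has >= 2 members)
--     mid = [b for a, b, c in zip(s, s[1:], s[2:]) if c - b > 3 and b - a <= 3]
--     return [s[0]] + mid + [s[-1]]
-- ===== Notes on version B (the rewrite author's own statement) =====
-- stated objective: simpler
-- what changed: Replaces A's stateful bag accumulator with a stateless local predicate: after sorting, a representative is exactly an element whose following gap is > 3 and whose preceding gap is <= 3, computed as one comprehension over adjacent triples, bracketed by the first and last elements.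
import Mathlib
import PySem

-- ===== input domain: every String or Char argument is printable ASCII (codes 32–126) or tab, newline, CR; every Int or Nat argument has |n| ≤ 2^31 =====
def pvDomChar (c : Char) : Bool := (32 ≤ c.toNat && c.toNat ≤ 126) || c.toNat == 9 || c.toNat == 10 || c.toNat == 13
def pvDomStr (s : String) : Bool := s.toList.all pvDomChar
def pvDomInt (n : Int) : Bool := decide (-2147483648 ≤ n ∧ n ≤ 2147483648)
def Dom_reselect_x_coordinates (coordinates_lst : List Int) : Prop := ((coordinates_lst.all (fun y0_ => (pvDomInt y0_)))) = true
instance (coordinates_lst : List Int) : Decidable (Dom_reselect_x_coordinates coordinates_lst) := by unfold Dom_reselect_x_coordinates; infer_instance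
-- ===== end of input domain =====

-- B replaces A's stateful bag accumulator by a stateless local predicate on adjacent triples of the
-- sorted list (gap after > 3 and gap before ≤ 3), bracketed by first and last element; objective: simpler.
-- Pre_ excludes only the empty list, on which Python A raises IndexError indexing the first element; B raises there too.

-- ===== PORT A =====
-- A's for-loop: state (bag, result); bag.append = ++ [i], bag[-1] = getLast?.getD 0
def pvALoop (bag result : List Int) : List Int → List Int × List Int
  | [] => (bag, result)
  | i :: rest =>
    if bag.length = 0 then pvALoop (bag ++ [i]) result rest
    else if i - (bag.getLast?.getD 0) ≤ 3 then pvALoop (bag ++ [i]) result rest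
    else if 2 ≤ bag.length then pvALoop [i] (result ++ [bag.getLast?.getD 0]) rest
    else pvALoop [i] result rest

def reselect_x_coordinates (coordinates_lst : List Int) : List Int :=
  let s := PySem.List.sorted coordinates_lst (fun x => x)
  match s with
  | [] => []  -- Python A raises IndexError here (excluded by Pre_)
  | x :: _ =>
    let st := pvALoop [] [x] s
    -- after the loop, `i` holds the last element of s
    st.2 ++ [s.getLast?.getD 0]

-- ===== PORT B =====
-- Source B's comprehension over zip(s, s[1:], s[2:]); slicing from k = List.drop k
def pvTrip (s : List Int) : List Int :=
  ((s.zip (s.drop 1)).zip (s.drop 2)).filterMap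
    (fun pc => if 3 < pc.2 - pc.1.2 ∧ pc.1.2 - pc.1.1 ≤ 3 then some pc.1.2 else none)

def reselect_x_coordinates_alt (coordinates_lst : List Int) : List Int :=
  let s := PySem.List.sorted coordinates_lst (fun x => x)
  match s with
  | [] => []  -- Source B raises IndexError here (excluded by Pre_)
  | x :: _ => [x] ++ pvTrip s ++ [s.getLast?.getD 0]

-- ===== PRECONDITION & SPEC =====
-- Pre_ excludes exactly the empty list: Python A indexes the first element and raises IndexError there.
def Pre_reselect_x_coordinates (coordinates_lst : List Int) : Prop := coordinates_lst ≠ []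
instance (coordinates_lst : List Int) : Decidable (Pre_reselect_x_coordinates coordinates_lst) := by
  unfold Pre_reselect_x_coordinates; infer_instance

def pvWitness_reselect_x_coordinates : List Int := [1, 2, 9, 10, 20]

def Spec_reselect_x_coordinates (coordinates_lst : List Int) (out : List Int) : Prop := out = reselect_x_coordinates_alt coordinates_lst
instance (coordinates_lst : List Int) (out : List Int) : Decidable (Spec_reselect_x_coordinates coordinates_lst out) := by unfold Spec_reselect_x_coordinates; infer_instance

-- ===== CLAIM =====
def Claim_equal_reselect_x_coordinates : Prop := ∀ (coordinates_lst : List Int), Dom_reselect_x_coordinates coordinates_lst → Pre_reselect_x_coordinates coordinates_lst → Spec_reselect_x_coordinates coordinates_lst (reselect_x_coordinates coordinates_lst)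

-- ===== LEMMAS AND PROOFS =====

-- A's bag only matters through its last element and whether it has ≥ 2 members: pvG abstracts the loop.
def pvG (a : Int) (l2 : Bool) : List Int → List Int
  | [] => []
  | y :: ys => if y - a ≤ 3 then pvG y true ys else (if l2 then [a] else []) ++ pvG y false ys

theorem pvALoop_G (xs : List Int) (b res : List Int) (hb : b ≠ []) :
    (pvALoop b res xs).2 = res ++ pvG (b.getLast?.getD 0) (decide (2 ≤ b.length)) xs := by
  induction xs generalizing b res with
  | nil => simp [pvALoop, pvG]
  | cons y ys ih =>
    have hlen : ¬ b.length = 0 := by simpa using hb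
    have hb1 : 1 ≤ b.length := Nat.one_le_iff_ne_zero.mpr hlen
    simp only [pvALoop, hlen, if_false]
    by_cases hgap : y - (b.getLast?.getD 0) ≤ 3
    · simp only [hgap, if_true]
      rw [ih (b ++ [y]) res (by simp)]
      have h2 : decide (2 ≤ (b ++ [y]).length) = true := by
        simp only [List.length_append, List.length_cons, List.length_nil]
        exact decide_eq_true (by omega)
      simp only [List.getLast?_concat, Option.getD_some, h2]
      simp [pvG, hgap]
    · simp only [hgap, if_false]
      by_cases h2 : 2 ≤ b.length
      · simp only [h2, if_true]
        rw [ih [y] _ (by simp)]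
        simp [pvG, hgap, List.append_assoc]
      · simp only [h2, if_false]
        rw [ih [y] _ (by simp)]
        simp [pvG, hgap]

theorem pvTrip_cons (p a y : Int) (ys : List Int) :
    pvTrip (p :: a :: y :: ys)
      = (if 3 < y - a ∧ a - p ≤ 3 then [a] else []) ++ pvTrip (a :: y :: ys) := by
  simp only [pvTrip, List.drop, List.zip_cons_cons, List.filterMap_cons]
  split_ifs with hc <;> simp

-- pvG with the "previous gap" flag computed from an explicit predecessor is exactly the triple comprehension.
theorem pvG_trip (xs : List Int) (p a : Int) :
    pvG a (decide (a - p ≤ 3)) xs = pvTrip (p :: a :: xs) := by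
  induction xs generalizing p a with
  | nil => simp [pvG, pvTrip]
  | cons y ys ih =>
    rw [pvTrip_cons, ← ih a y]
    by_cases hgap : y - a ≤ 3
    · have : ¬ (3 < y - a ∧ a - p ≤ 3) := by omega
      simp [pvG, hgap]
    · have h3 : 3 < y - a := by omega
      by_cases hp : a - p ≤ 3 <;> simp [pvG, hgap, hp, h3]

-- the head element is never emitted by the comprehension when prefixed by a far-away phantom predecessor
theorem pvG_head (xs : List Int) (x : Int) :
    pvG x false xs = pvTrip (x :: xs) := by
  have h := pvG_trip xs (x - 4) x
  have hd : decide (x - (x - 4) ≤ 3) = false := by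
    simp only [decide_eq_false_iff_not]; omega
  rw [hd] at h
  rw [h]
  cases xs with
  | nil => simp [pvTrip]
  | cons y ys =>
    rw [pvTrip_cons]
    have hc : ¬ (3 < y - x ∧ x - (x - 4) ≤ 3) := by omega
    simp only [if_neg hc, List.nil_append]

-- ===== VERDICT =====
theorem reselect_x_coordinates_spec : Claim_equal_reselect_x_coordinates := by
  intro lst _ hpre
  unfold Spec_reselect_x_coordinates reselect_x_coordinates reselect_x_coordinates_alt
  have hs : PySem.List.sorted lst (fun x => x) ≠ [] := by
    intro h
    have hp := PySem.List.sorted_perm (xs := lst) (key := fun x => x) (rev := false)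
    rw [h] at hp
    exact hpre hp.symm.eq_nil
  cases h : PySem.List.sorted lst (fun x => x) with
  | nil => exact absurd h hs
  | cons x rest =>
    simp only
    have h1 : pvALoop [] [x] (x :: rest) = pvALoop [x] [x] rest := by
      simp [pvALoop]
    rw [h1, pvALoop_G rest [x] [x] (by simp)]
    have hd : decide (2 ≤ ([x] : List Int).length) = false := by simp
    rw [hd]
    simp only [List.getLast?_singleton, Option.getD_some]
    rw [pvG_head]
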